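-- pv_equiv track=rewrite | github.com/mdrum29/poker_hand_simulator | poker_simulator/src/utils.py | are_consecutive
-- ===== SOURCE A (Python) =====
-- def are_consecutive(numbers):
--     sorted_numbers = sorted(set(numbers))  # Remove duplicates and sort
--
--     # adding Ace as a 1 as well.
--     if 14 in sorted_numbers:
--         sorted_numbers = sorted(sorted_numbers + [1])
--
--     consecutive_list = []
--     current_consecutive = [sorted_numbers[0]]
--
--     for i in range(1, len(sorted_numbers)):
--         if sorted_numbers[i] == sorted_numbers[i - 1] + 1:
--             current_consecutive.append(sorted_numbers[i])
--         else:
--             current_consecutive = [sorted_numbers[i]]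
--
--         if len(current_consecutive) >= 5:
--             consecutive_list = current_consecutive
--
--     return consecutive_list
-- ===== SOURCE B (Python) =====
-- def are_consecutive(numbers):
--     values = sorted(set(numbers))
--
--     # adding Ace as a 1 as well.
--     if 14 in values:
--         values = sorted(values + [1])
--
--     best = []
--     for run in _runs(values):
--         if len(run) >= 5:
--             best = run
--     return best
--
--
-- def _runs(values):
--     """Divide and conquer: split values into its maximal runs of +1-adjacent
--     elements by recursively halving the list and merging at the boundary."""
--     if len(values) <= 1:
--         return [values[:]] if values else []
--     mid = len(values) // 2
--     return _merge(_runs(values[:mid]), _runs(values[mid:]))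
--
--
-- def _merge(left, right):
--     """Join two adjacent run lists, fusing the boundary runs if consecutive."""
--     if right[0][0] == left[-1][-1] + 1:
--         return left[:-1] + [left[-1] + right[0]] + right[1:]
--     return left + right
-- ===== Notes on version B (the rewrite author's own statement) =====
-- stated objective: alternative
-- what changed: A's single accumulating scan is replaced by a divide-and-conquer decomposition: the sorted de-duplicated (ace-low-augmented) list is recursively halved into maximal +1-adjacent runs, merging the two boundary runs when they connect, and a final pass keeps the last run of length >= 5.
import Mathlib
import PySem

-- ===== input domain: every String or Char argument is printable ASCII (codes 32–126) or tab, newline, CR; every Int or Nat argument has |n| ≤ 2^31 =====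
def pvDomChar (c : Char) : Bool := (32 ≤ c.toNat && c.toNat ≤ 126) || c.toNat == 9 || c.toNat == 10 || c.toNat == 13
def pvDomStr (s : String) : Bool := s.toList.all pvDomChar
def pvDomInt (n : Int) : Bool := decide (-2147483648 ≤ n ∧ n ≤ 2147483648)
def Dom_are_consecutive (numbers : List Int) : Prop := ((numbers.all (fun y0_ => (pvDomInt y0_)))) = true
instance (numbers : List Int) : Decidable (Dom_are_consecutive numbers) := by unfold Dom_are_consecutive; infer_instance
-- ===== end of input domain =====

-- B replaces A's single accumulating scan by a divide-and-conquer split into maximal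
-- +1-adjacent runs followed by a pass keeping the last run of length ≥ 5 (objective: alternative).

-- ===== PORT A =====
-- A's loop 'for i in range(1, len)' compares sorted_numbers[i] with sorted_numbers[i-1];
-- ported structurally with prev = sorted_numbers[i-1] carried along the tail.
def aLoop : Int → List Int → List Int × List Int → List Int × List Int
  | _, [], st => st
  | prev, x :: rest, (clist, cur) =>
    let cur' := if x = prev + 1 then cur ++ [x] else [x]
    let clist' := if 5 ≤ cur'.length then cur' else clist
    aLoop x rest (clist', cur')

def are_consecutive (numbers : List Int) : List Int :=
  let s0 := PySem.List.sorted (PySem.Set.ofList numbers) (fun x => x) false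
  let sn := if (14 : Int) ∈ s0 then PySem.List.sorted (s0 ++ [1]) (fun x => x) false else s0
  match sn with
  | [] => []          -- Python raises IndexError here (sorted_numbers[0]); excluded by Pre_
  | h :: t => (aLoop h t ([], [h])).1

-- ===== PORT B =====
-- _merge: Python's left[-1][-1] / right[0][0] indexings always succeed where B calls
-- them (both sides nonempty lists of nonempty runs); they are ported by the match,
-- whose fallback branches are unreachable there.  left[:-1] = dropLast, right[1:] = tail
-- (exact, PySem slice_to_neg_one / slice_from_one).
def bMerge (left right : List (List Int)) : List (List Int) :=
  match left.getLast?, right.head? with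
  | some ll, some rh =>
    match ll.getLast?, rh.head? with
    | some a, some b =>
      if b = a + 1 then left.dropLast ++ [ll ++ rh] ++ right.tail
      else left ++ right
    | _, _ => left ++ right
  | _, _ => left ++ right

-- _runs: values[:mid] and values[mid:] with 0 ≤ mid ≤ len are List.take / List.drop
-- (exact, PySem slice_to_natCast / slice_from_natCast).
def bRuns (values : List Int) : List (List Int) :=
  if values.length ≤ 1 then
    if values = [] then [] else [values]
  else
    bMerge (bRuns (values.take (values.length / 2))) (bRuns (values.drop (values.length / 2)))
termination_by values.length
decreasing_by
  · simp only [List.length_take]; omega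
  · simp only [List.length_drop]; omega

def are_consecutive_alt (numbers : List Int) : List Int :=
  let s0 := PySem.List.sorted (PySem.Set.ofList numbers) (fun x => x) false
  let values := if (14 : Int) ∈ s0 then PySem.List.sorted (s0 ++ [1]) (fun x => x) false else s0
  (bRuns values).foldl (fun best run => if 5 ≤ run.length then run else best) []

-- ===== PRECONDITION & SPEC =====
-- Pre_ excludes only the empty list, on which Python A raises IndexError (sorted_numbers[0]).
-- (The ports are total; are_consecutive [] is a placeholder value outside the claim.)
def Pre_are_consecutive (numbers : List Int) : Prop := numbers ≠ []
instance (numbers : List Int) : Decidable (Pre_are_consecutive numbers) := by unfold Pre_are_consecutive; infer_instance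
def pvWitness_are_consecutive : List Int := [2, 3, 4, 5, 6, 9]

def Spec_are_consecutive (numbers : List Int) (out : List Int) : Prop := out = are_consecutive_alt numbers
instance (numbers : List Int) (out : List Int) : Decidable (Spec_are_consecutive numbers out) := by unfold Spec_are_consecutive; infer_instance

-- ===== CLAIM (what is proved, stated in full; the proofs are below) =====
def Claim_equal_are_consecutive : Prop := ∀ (numbers : List Int), Dom_are_consecutive numbers → Pre_are_consecutive numbers → Spec_are_consecutive numbers (are_consecutive numbers)

-- ===== LEMMAS AND PROOFS =====

-- Maximal +1-runs of (cur ++ xs), scanning xs with previous element prev.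
def pvRuns (prev : Int) (cur : List Int) : List Int → List (List Int)
  | [] => [cur]
  | x :: xs => if x = prev + 1 then pvRuns x (cur ++ [x]) xs else cur :: pvRuns x [x] xs

def pvRunsOf : List Int → List (List Int)
  | [] => []
  | h :: t => pvRuns h [h] t

-- last run of length ≥ 5, else init
def pvPick (rs : List (List Int)) (init : List Int) : List Int :=
  rs.foldl (fun b r => if 5 ≤ r.length then r else b) init

theorem pvRuns_cons (prev : Int) (cur : List Int) (x : Int) (xs : List Int) :
    pvRuns prev cur (x :: xs)
      = if x = prev + 1 then pvRuns x (cur ++ [x]) xs else cur :: pvRuns x [x] xs := rfl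

theorem aLoop_cons (prev x : Int) (rest : List Int) (clist cur : List Int) :
    aLoop prev (x :: rest) (clist, cur)
      = aLoop x rest
          ((if 5 ≤ (if x = prev + 1 then cur ++ [x] else [x]).length
            then (if x = prev + 1 then cur ++ [x] else [x]) else clist),
           (if x = prev + 1 then cur ++ [x] else [x])) := rfl

theorem pvRuns_head (xs : List Int) : ∀ (prev : Int) (cur : List Int),
    ∃ d rs', pvRuns prev cur xs = (cur ++ d) :: rs' := by
  induction xs with
  | nil => intro prev cur; exact ⟨[], [], by simp [pvRuns]⟩
  | cons x xs ih =>
    intro prev cur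
    by_cases h : x = prev + 1
    · obtain ⟨d, rs', hd⟩ := ih x (cur ++ [x])
      refine ⟨x :: d, rs', ?_⟩
      rw [pvRuns_cons, if_pos h, hd]
      simp
    · exact ⟨[], pvRuns x [x] xs, by rw [pvRuns_cons, if_neg h]; simp⟩

theorem aLoop_pick (rest : List Int) : ∀ (prev : Int) (cur clist : List Int),
    (5 ≤ cur.length → clist = cur) →
    (aLoop prev rest (clist, cur)).1 = pvPick (pvRuns prev cur rest) clist := by
  induction rest with
  | nil =>
    intro prev cur clist hinv
    by_cases h : 5 ≤ cur.length
    · simp [aLoop, pvRuns, pvPick, h, hinv h]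
    · simp [aLoop, pvRuns, pvPick, h]
  | cons x xs ih =>
    intro prev cur clist hinv
    rw [aLoop_cons, pvRuns_cons]
    by_cases h : x = prev + 1
    · rw [if_pos h, if_pos h]
      by_cases h5 : 5 ≤ (cur ++ [x]).length
      · rw [if_pos h5, ih x (cur ++ [x]) (cur ++ [x]) (fun _ => rfl)]
        obtain ⟨d, rs', hd⟩ := pvRuns_head xs x (cur ++ [x])
        have h5' : 5 ≤ ((cur ++ [x]) ++ d).length := by
          simp only [List.length_append] at *; omega
        rw [hd]
        simp only [pvPick, List.foldl_cons, if_pos h5']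
      · rw [if_neg h5, ih x (cur ++ [x]) clist (fun hh => absurd hh h5)]
    · rw [if_neg h, if_neg h,
          if_neg (by simp : ¬ (5 ≤ ([x] : List Int).length)),
          ih x [x] clist (fun hh => by simp at hh)]
      simp only [pvPick, List.foldl_cons]
      by_cases hcl : 5 ≤ cur.length
      · rw [if_pos hcl, hinv hcl]
      · rw [if_neg hcl]

-- prepending to the current run prepends to the first emitted run only
theorem pvRuns_prefix (xs : List Int) : ∀ (prev : Int) (c1 cur r : List Int)
    (rs : List (List Int)), pvRuns prev cur xs = r :: rs →
    pvRuns prev (c1 ++ cur) xs = (c1 ++ r) :: rs := by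
  induction xs with
  | nil =>
    intro prev c1 cur r rs h
    simp only [pvRuns] at h ⊢
    injection h with h1 h2
    simp [h1, h2]
  | cons x xs ih =>
    intro prev c1 cur r rs h
    rw [pvRuns_cons] at h ⊢
    by_cases hx : x = prev + 1
    · rw [if_pos hx] at h ⊢
      rw [List.append_assoc]
      exact ih x c1 (cur ++ [x]) r rs h
    · rw [if_neg hx] at h ⊢
      injection h with h1 h2
      simp [h1, h2]

theorem bMerge_cons (c : List Int) (rs : List (List Int)) (Y : List (List Int))
    (hrs : rs ≠ []) : bMerge (c :: rs) Y = c :: bMerge rs Y := by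
  obtain ⟨r', rs', rfl⟩ := List.exists_cons_of_ne_nil hrs
  unfold bMerge
  rw [List.getLast?_cons_cons]
  rcases hgl : (r' :: rs').getLast? with _ | ll
  · simp at hgl
  · rcases hy : Y.head? with _ | rh
    · simp
    · rcases hll : ll.getLast? with _ | a
      · simp [hll]
      · rcases hrh : rh.head? with _ | b
        · simp [hll, hrh]
        · by_cases hb : b = a + 1 <;> simp [hll, hrh, hb]

theorem pvRuns_append (xs : List Int) : ∀ (prev : Int) (cur : List Int) (ys : List Int),
    cur.getLast? = some prev →
    pvRuns prev cur (xs ++ ys) = bMerge (pvRuns prev cur xs) (pvRunsOf ys) := by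
  induction xs with
  | nil =>
    intro prev cur ys hlast
    simp only [List.nil_append]
    cases ys with
    | nil => simp [pvRuns, pvRunsOf, bMerge]
    | cons y ys' =>
      obtain ⟨d, rs', hd⟩ := pvRuns_head ys' y [y]
      have hro : pvRunsOf (y :: ys') = (y :: d) :: rs' := by
        simpa [pvRunsOf] using hd
      rw [pvRuns_cons]
      show _ = bMerge [cur] (pvRunsOf (y :: ys'))
      rw [hro]
      unfold bMerge
      simp only [List.getLast?_singleton, List.head?_cons, hlast]
      by_cases hy : y = prev + 1
      · rw [if_pos hy, if_pos hy]
        have := pvRuns_prefix ys' y cur [y] ([y] ++ d) rs' (by simpa using hd)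
        rw [this]
        simp
      · rw [if_neg hy, if_neg hy, hd]
        simp
  | cons x xs' ih =>
    intro prev cur ys hlast
    simp only [List.cons_append]
    rw [pvRuns_cons, pvRuns_cons]
    by_cases hx : x = prev + 1
    · rw [if_pos hx, if_pos hx]
      exact ih x (cur ++ [x]) ys (by simp)
    · rw [if_neg hx, if_neg hx, ih x [x] ys (by simp)]
      obtain ⟨d, rs', hd⟩ := pvRuns_head xs' x [x]
      rw [bMerge_cons cur _ _ (by rw [hd]; simp)]

theorem bRuns_eq_aux (n : Nat) : ∀ (values : List Int), values.length ≤ n →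
    bRuns values = pvRunsOf values := by
  induction n with
  | zero =>
    intro values h
    have hv : values = [] := List.length_eq_zero_iff.mp (Nat.le_zero.mp h)
    subst hv
    rw [bRuns]
    simp [pvRunsOf]
  | succ n ih =>
    intro values hlen
    by_cases h1 : values.length ≤ 1
    · rw [bRuns, if_pos h1]
      cases values with
      | nil => simp [pvRunsOf]
      | cons a t =>
        have ht : t = [] := by
          cases t with
          | nil => rfl
          | cons b t' => simp at h1
        subst ht
        simp [pvRunsOf, pvRuns]
    · rw [bRuns, if_neg h1]
      have hlen2 : 2 ≤ values.length := by omega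
      have hmid1 : 1 ≤ values.length / 2 := by omega
      have hmidlt : values.length / 2 < values.length := by omega
      have htake : (values.take (values.length / 2)).length ≤ n := by
        simp only [List.length_take]; omega
      have hdrop : (values.drop (values.length / 2)).length ≤ n := by
        simp only [List.length_drop]; omega
      rw [ih _ htake, ih _ hdrop]
      cases ht : values.take (values.length / 2) with
      | nil =>
        have hl : (values.take (values.length / 2)).length = values.length / 2 := by
          simp only [List.length_take]; omega
        rw [ht] at hl; simp at hl; omega
      | cons h t =>
        have hsplit : values = (h :: t) ++ values.drop (values.length / 2) := by
          conv_lhs => rw [← List.take_append_drop (values.length / 2) values]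
          rw [ht]
        conv_rhs => rw [hsplit]
        show bMerge (pvRuns h [h] t) _ = pvRuns h [h] (t ++ _)
        rw [pvRuns_append t h [h] _ (by simp)]

theorem bRuns_eq (values : List Int) : bRuns values = pvRunsOf values :=
  bRuns_eq_aux values.length values le_rfl

theorem core_eq (L : List Int) :
    (match L with
     | [] => ([] : List Int)
     | h :: t => (aLoop h t ([], [h])).1)
      = (bRuns L).foldl (fun best run => if 5 ≤ run.length then run else best) [] := by
  rw [bRuns_eq]
  cases L with
  | nil => rfl
  | cons h t =>
    show (aLoop h t ([], [h])).1 = pvPick (pvRuns h [h] t) []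
    exact aLoop_pick t h [h] [] (by simp)

-- ===== VERDICT (by name: the statement is the Claim_ definition above) =====
theorem are_consecutive_spec : Claim_equal_are_consecutive := by
  intro numbers _ _
  show are_consecutive numbers = are_consecutive_alt numbers
  unfold are_consecutive are_consecutive_alt
  exact core_eq _
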